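-- pv_equiv track=rewrite | github.com/ToPola0/kartoteka-main | statistics.py | get_family_age_ranges
-- ===== SOURCE A (Python) =====
-- def get_family_age_ranges(found_people):
--     """Zwraca zakres wieku (min/max) dla każdej kategorii rodzin (arkuszy)."""
--     # Założenie: found_people zawiera 'file_path' i 'wiek' dla każdej osoby
--     from collections import defaultdict
--     family_ages = defaultdict(list)
--     for person in found_people:
--         fp = person.get('file_path')
--         wiek = person.get('wiek')
--         if fp and wiek is not None:
--             try:
--                 family_ages[fp].append(int(wiek))
--             except Exception:
--                 pass
--     # Podział na kategorie
--     ranges = {1: [], 2: [], 3: [], 4: []}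
--     for ages in family_ages.values():
--         size = len(ages)
--         if size == 1:
--             ranges[1].append((min(ages), max(ages)))
--         elif size == 2:
--             ranges[2].append((min(ages), max(ages)))
--         elif 3 <= size <= 4:
--             ranges[3].append((min(ages), max(ages)))
--         elif size >= 5:
--             ranges[4].append((min(ages), max(ages)))
--     # Zwróć min/max dla każdej kategorii
--     def minmax(lst):
--         if not lst:
--             return None, None
--         mins = [x[0] for x in lst]
--         maxs = [x[1] for x in lst]
--         return min(mins), max(maxs)
--     return {
--         'family_1': minmax(ranges[1]),
--         'family_2': minmax(ranges[2]),
--         'family_3_4': minmax(ranges[3]),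
--         'family_5plus': minmax(ranges[4])
--     }
-- ===== SOURCE B (Python) =====
-- def get_family_age_ranges(found_people):
--     """Zwraca zakres wieku (min/max) dla kazdej kategorii rodzin (arkuszy)."""
--     family_ages = {}
--     for person in found_people:
--         fp = person.get('file_path')
--         wiek = person.get('wiek')
--         if not fp or wiek is None:
--             continue
--         try:
--             age = int(wiek)
--         except Exception:
--             continue
--         family_ages[fp] = family_ages.get(fp, []) + [age]
--     # pool every group's ages directly into its size category
--     pooled = {'family_1': [], 'family_2': [], 'family_3_4': [], 'family_5plus': []}
--     for ages in family_ages.values():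
--         n = len(ages)
--         if n == 1:
--             key = 'family_1'
--         elif n == 2:
--             key = 'family_2'
--         elif n <= 4:
--             key = 'family_3_4'
--         else:
--             key = 'family_5plus'
--         pooled[key].extend(ages)
--     return {k: ((min(v), max(v)) if v else (None, None)) for k, v in pooled.items()}
-- ===== Notes on version B (the rewrite author's own statement) =====
-- stated objective: simpler
-- what changed: Instead of storing a (min,max) tuple per family group per category and then taking min-of-mins/max-of-maxs, B pools every group's ages directly into its size category and computes a single min/max per category at the end.
import Mathlib
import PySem

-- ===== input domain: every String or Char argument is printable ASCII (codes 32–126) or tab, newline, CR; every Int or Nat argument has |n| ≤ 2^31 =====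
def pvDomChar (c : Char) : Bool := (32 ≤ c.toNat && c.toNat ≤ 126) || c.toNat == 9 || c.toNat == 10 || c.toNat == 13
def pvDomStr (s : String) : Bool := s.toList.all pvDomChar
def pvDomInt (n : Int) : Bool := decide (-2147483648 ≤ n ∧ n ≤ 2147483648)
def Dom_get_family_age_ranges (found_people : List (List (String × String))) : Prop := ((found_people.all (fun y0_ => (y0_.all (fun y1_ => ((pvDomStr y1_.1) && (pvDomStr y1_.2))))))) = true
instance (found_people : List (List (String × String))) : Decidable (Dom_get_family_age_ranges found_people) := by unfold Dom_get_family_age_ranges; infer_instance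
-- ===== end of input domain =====

-- ===== PORT A =====
-- B collapses A's two-level min-of-mins/max-of-maxs into one pooled min/max per category (objective: simpler).
-- person.get(...) = first-match lookup on the association list (PySem.Dict.mk).
def pvPersonGet (person : List (String × String)) (k : String) : Option String :=
  (PySem.Dict.mk person).get? k

-- A's grouping loop: defaultdict(list) with family_ages[fp].append(int(wiek))
def pvFamilyAgesA (found_people : List (List (String × String))) : PySem.Dict String (List Int) :=
  found_people.foldl (fun d person =>
    match pvPersonGet person "file_path", pvPersonGet person "wiek" with
    | some fp, some wiek =>
        if fp ≠ "" then
          match PySem.Int.ofStr? wiek with           -- int(wiek); except: pass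
          | some v => d.modify fp [] (fun l => l ++ [v])
          | none => d
        else d
    | _, _ => d) PySem.Dict.empty

-- A's minmax helper; min(mins)/max(maxs) on the nonempty branch are exact as min?/max? (some _ there)
def pvMinMaxA (lst : List (Int × Int)) : Option Int × Option Int :=
  if lst = [] then (none, none)
  else (PySem.List.min? (lst.map (fun x => x.1)) (fun x => x),
        PySem.List.max? (lst.map (fun x => x.2)) (fun x => x))

def get_family_age_ranges (found_people : List (List (String × String))) : List (String × Option Int × Option Int) :=
  let fa := pvFamilyAgesA found_people
  let r := fa.values.foldl
    (fun (r : List (Int × Int) × List (Int × Int) × List (Int × Int) × List (Int × Int)) ages =>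
      let size := ages.length
      let mm := ((PySem.List.min? ages (fun x => x)).getD 0, (PySem.List.max? ages (fun x => x)).getD 0)
      if size = 1 then (r.1 ++ [mm], r.2.1, r.2.2.1, r.2.2.2)
      else if size = 2 then (r.1, r.2.1 ++ [mm], r.2.2.1, r.2.2.2)
      else if 3 ≤ size ∧ size ≤ 4 then (r.1, r.2.1, r.2.2.1 ++ [mm], r.2.2.2)
      else if 5 ≤ size then (r.1, r.2.1, r.2.2.1, r.2.2.2 ++ [mm])
      else r)
    ([], [], [], [])
  [("family_1", pvMinMaxA r.1), ("family_2", pvMinMaxA r.2.1),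
   ("family_3_4", pvMinMaxA r.2.2.1), ("family_5plus", pvMinMaxA r.2.2.2)]

-- ===== PORT B =====
-- B's grouping loop: plain dict with get-default and early continue
def pvFamilyAgesB (found_people : List (List (String × String))) : PySem.Dict String (List Int) :=
  found_people.foldl (fun d person =>
    match pvPersonGet person "file_path", pvPersonGet person "wiek" with
    | some fp, some wiek =>
        if fp = "" then d                             -- not fp: continue
        else
          match PySem.Int.ofStr? wiek with            -- int(wiek); except: continue
          | none => d
          | some age => d.insert fp (d.getD fp [] ++ [age])
    | _, _ => d) PySem.Dict.empty

-- (min(v), max(v)) if v else (None, None)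
def pvRangeB (v : List Int) : Option Int × Option Int :=
  if v = [] then (none, none)
  else (PySem.List.min? v (fun x => x), PySem.List.max? v (fun x => x))

def get_family_age_ranges_alt (found_people : List (List (String × String))) : List (String × Option Int × Option Int) :=
  let fa := pvFamilyAgesB found_people
  let p := fa.values.foldl
    (fun (p : List Int × List Int × List Int × List Int) ages =>
      let n := ages.length
      if n = 1 then (p.1 ++ ages, p.2.1, p.2.2.1, p.2.2.2)
      else if n = 2 then (p.1, p.2.1 ++ ages, p.2.2.1, p.2.2.2)
      else if n ≤ 4 then (p.1, p.2.1, p.2.2.1 ++ ages, p.2.2.2)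
      else (p.1, p.2.1, p.2.2.1, p.2.2.2 ++ ages))
    ([], [], [], [])
  [("family_1", pvRangeB p.1), ("family_2", pvRangeB p.2.1),
   ("family_3_4", pvRangeB p.2.2.1), ("family_5plus", pvRangeB p.2.2.2)]

-- ===== PRECONDITION & SPEC =====
def Spec_get_family_age_ranges (found_people : List (List (String × String))) (out : List (String × Option Int × Option Int)) : Prop := out = get_family_age_ranges_alt found_people
instance (found_people : List (List (String × String))) (out : List (String × Option Int × Option Int)) : Decidable (Spec_get_family_age_ranges found_people out) := by unfold Spec_get_family_age_ranges; infer_instance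

-- ===== CLAIM (what is proved, stated in full; the proofs are below) =====
def Claim_equal_get_family_age_ranges : Prop := ∀ (found_people : List (List (String × String))), Dom_get_family_age_ranges found_people → Spec_get_family_age_ranges found_people (get_family_age_ranges found_people)

-- ===== LEMMAS AND PROOFS =====

-- the two grouping loops build the same dict: Dict.modify IS insert (f (getD …)), and the
-- branch orders are logically identical
lemma fa_eq (l : List (List (String × String))) : pvFamilyAgesA l = pvFamilyAgesB l := by
  unfold pvFamilyAgesA pvFamilyAgesB
  congr 1
  funext d person
  cases pvPersonGet person "file_path" with
  | none => rfl
  | some fp =>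
    cases pvPersonGet person "wiek" with
    | none => rfl
    | some wiek =>
      by_cases h : fp = ""
      · simp [h]
      · cases hw : PySem.Int.ofStr? wiek <;>
          simp [h, hw, PySem.Dict.modify]

lemma foldl_min_min (t : List Int) (q x : Int) :
    t.foldl min (min q x) = min q (t.foldl min x) := by
  induction t generalizing x with
  | nil => rfl
  | cons y u ih => simp only [List.foldl_cons, min_assoc, ih]

lemma foldl_max_max (t : List Int) (q x : Int) :
    t.foldl max (max q x) = max q (t.foldl max x) := by
  induction t generalizing x with
  | nil => rfl
  | cons y u ih => simp only [List.foldl_cons, max_assoc, ih]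

-- appending a single pair (m, _) to a category of (min,max)-pairs
lemma min?_pairs (r : List (Int × Int)) (m y : Int) :
    PySem.List.min? ((r ++ [(m, y)]).map (fun x => x.1)) (fun x => x) =
      some (match PySem.List.min? (r.map (fun x => x.1)) (fun x => x) with
            | none => m | some q => min q m) := by
  cases h : r.map (fun x => x.1) with
  | nil => rw [List.map_append, h]; rfl
  | cons z u =>
    rw [List.map_append, h, PySem.List.min?_id_cons]
    show PySem.List.min? (z :: (u ++ [m])) (fun x => x) = _
    rw [PySem.List.min?_id_cons, List.foldl_append]
    rfl

lemma max?_pairs (r : List (Int × Int)) (m y : Int) :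
    PySem.List.max? ((r ++ [(y, m)]).map (fun x => x.2)) (fun x => x) =
      some (match PySem.List.max? (r.map (fun x => x.2)) (fun x => x) with
            | none => m | some q => max q m) := by
  cases h : r.map (fun x => x.2) with
  | nil => rw [List.map_append, h]; rfl
  | cons z u =>
    rw [List.map_append, h, PySem.List.max?_id_cons]
    show PySem.List.max? (z :: (u ++ [m])) (fun x => x) = _
    rw [PySem.List.max?_id_cons, List.foldl_append]
    rfl

-- pooling a whole nonempty group into a category of ages
lemma min?_pool (p a : List Int) (ha : a ≠ []) :
    PySem.List.min? (p ++ a) (fun x => x) =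
      some (match PySem.List.min? p (fun x => x) with
            | none => (PySem.List.min? a (fun x => x)).getD 0
            | some q => min q ((PySem.List.min? a (fun x => x)).getD 0)) := by
  cases a with
  | nil => exact absurd rfl ha
  | cons x t =>
    rw [PySem.List.min?_id_cons]
    cases p with
    | nil => rw [List.nil_append, PySem.List.min?_id_cons]; rfl
    | cons z u =>
      rw [PySem.List.min?_id_cons]
      show PySem.List.min? (z :: (u ++ x :: t)) (fun x => x) = _
      rw [PySem.List.min?_id_cons, List.foldl_append, List.foldl_cons, foldl_min_min]
      rfl

lemma max?_pool (p a : List Int) (ha : a ≠ []) :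
    PySem.List.max? (p ++ a) (fun x => x) =
      some (match PySem.List.max? p (fun x => x) with
            | none => (PySem.List.max? a (fun x => x)).getD 0
            | some q => max q ((PySem.List.max? a (fun x => x)).getD 0)) := by
  cases a with
  | nil => exact absurd rfl ha
  | cons x t =>
    rw [PySem.List.max?_id_cons]
    cases p with
    | nil => rw [List.nil_append, PySem.List.max?_id_cons]; rfl
    | cons z u =>
      rw [PySem.List.max?_id_cons]
      show PySem.List.max? (z :: (u ++ x :: t)) (fun x => x) = _
      rw [PySem.List.max?_id_cons, List.foldl_append, List.foldl_cons, foldl_max_max]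
      rfl

-- final per-category outputs agree whenever the running min?/max? agree
lemma final_eq (r : List (Int × Int)) (p : List Int)
    (hmin : PySem.List.min? (r.map (fun x => x.1)) (fun x => x) = PySem.List.min? p (fun x => x))
    (hmax : PySem.List.max? (r.map (fun x => x.2)) (fun x => x) = PySem.List.max? p (fun x => x)) :
    pvMinMaxA r = pvRangeB p := by
  unfold pvMinMaxA pvRangeB
  by_cases hr : r = []
  · subst hr
    have hp : p = [] := (PySem.List.min?_eq_none_iff p (fun x => x)).mp (by rw [← hmin]; rfl)
    subst hp; rfl
  · have hp : p ≠ [] := fun hpe => hr (List.map_eq_nil_iff.mp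
      ((PySem.List.min?_eq_none_iff _ _).mp (by rw [hmin, hpe]; rfl)))
    rw [if_neg hr, if_neg hp, hmin, hmax]

-- the category accumulators of A and B stay pointwise min?/max?-equal through the loop
lemma phase2 (vs : List (List Int)) (r1 r2 r3 r4 : List (Int × Int)) (p1 p2 p3 p4 : List Int)
    (h1 : PySem.List.min? (r1.map (fun x => x.1)) (fun x => x) = PySem.List.min? p1 (fun x => x))
    (h2 : PySem.List.max? (r1.map (fun x => x.2)) (fun x => x) = PySem.List.max? p1 (fun x => x))
    (h3 : PySem.List.min? (r2.map (fun x => x.1)) (fun x => x) = PySem.List.min? p2 (fun x => x))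
    (h4 : PySem.List.max? (r2.map (fun x => x.2)) (fun x => x) = PySem.List.max? p2 (fun x => x))
    (h5 : PySem.List.min? (r3.map (fun x => x.1)) (fun x => x) = PySem.List.min? p3 (fun x => x))
    (h6 : PySem.List.max? (r3.map (fun x => x.2)) (fun x => x) = PySem.List.max? p3 (fun x => x))
    (h7 : PySem.List.min? (r4.map (fun x => x.1)) (fun x => x) = PySem.List.min? p4 (fun x => x))
    (h8 : PySem.List.max? (r4.map (fun x => x.2)) (fun x => x) = PySem.List.max? p4 (fun x => x)) :
    (let r := vs.foldl
      (fun (r : List (Int × Int) × List (Int × Int) × List (Int × Int) × List (Int × Int)) ages =>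
        let size := ages.length
        let mm := ((PySem.List.min? ages (fun x => x)).getD 0, (PySem.List.max? ages (fun x => x)).getD 0)
        if size = 1 then (r.1 ++ [mm], r.2.1, r.2.2.1, r.2.2.2)
        else if size = 2 then (r.1, r.2.1 ++ [mm], r.2.2.1, r.2.2.2)
        else if 3 ≤ size ∧ size ≤ 4 then (r.1, r.2.1, r.2.2.1 ++ [mm], r.2.2.2)
        else if 5 ≤ size then (r.1, r.2.1, r.2.2.1, r.2.2.2 ++ [mm])
        else r)
      (r1, r2, r3, r4)
     let p := vs.foldl
      (fun (p : List Int × List Int × List Int × List Int) ages =>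
        let n := ages.length
        if n = 1 then (p.1 ++ ages, p.2.1, p.2.2.1, p.2.2.2)
        else if n = 2 then (p.1, p.2.1 ++ ages, p.2.2.1, p.2.2.2)
        else if n ≤ 4 then (p.1, p.2.1, p.2.2.1 ++ ages, p.2.2.2)
        else (p.1, p.2.1, p.2.2.1, p.2.2.2 ++ ages))
      (p1, p2, p3, p4)
     pvMinMaxA r.1 = pvRangeB p.1 ∧ pvMinMaxA r.2.1 = pvRangeB p.2.1 ∧
       pvMinMaxA r.2.2.1 = pvRangeB p.2.2.1 ∧ pvMinMaxA r.2.2.2 = pvRangeB p.2.2.2) := by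
  induction vs generalizing r1 r2 r3 r4 p1 p2 p3 p4 with
  | nil =>
    exact ⟨final_eq _ _ h1 h2, final_eq _ _ h3 h4, final_eq _ _ h5 h6, final_eq _ _ h7 h8⟩
  | cons a vs ih =>
    simp only [List.foldl_cons]
    have hne : a.length ≠ 0 → a ≠ [] := fun h h0 => h (by simp [h0])
    by_cases c1 : a.length = 1
    · simp only [c1, reduceIte]
      exact ih _ _ _ _ _ _ _ _
        (by rw [min?_pairs, min?_pool _ _ (hne (by omega)), h1])
        (by rw [max?_pairs, max?_pool _ _ (hne (by omega)), h2])
        h3 h4 h5 h6 h7 h8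
    · by_cases c2 : a.length = 2
      · simp only [c2, reduceIte, if_neg (by omega : ¬ (2 = 1))]
        exact ih _ _ _ _ _ _ _ _ h1 h2
          (by rw [min?_pairs, min?_pool _ _ (hne (by omega)), h3])
          (by rw [max?_pairs, max?_pool _ _ (hne (by omega)), h4])
          h5 h6 h7 h8
      · by_cases c3 : 3 ≤ a.length ∧ a.length ≤ 4
        · simp only [if_neg c1, if_neg c2, if_pos c3, if_pos (by omega : a.length ≤ 4)]
          exact ih _ _ _ _ _ _ _ _ h1 h2 h3 h4
            (by rw [min?_pairs, min?_pool _ _ (hne (by omega)), h5])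
            (by rw [max?_pairs, max?_pool _ _ (hne (by omega)), h6])
            h7 h8
        · by_cases c5 : 5 ≤ a.length
          · simp only [if_neg c1, if_neg c2, if_neg c3, if_pos c5, if_neg (by omega : ¬ a.length ≤ 4)]
            exact ih _ _ _ _ _ _ _ _ h1 h2 h3 h4 h5 h6
              (by rw [min?_pairs, min?_pool _ _ (hne (by omega)), h7])
              (by rw [max?_pairs, max?_pool _ _ (hne (by omega)), h8])
          · -- a.length = 0: A skips, B appends the empty list
            have h0 : a = [] := by
              cases a with
              | nil => rfl
              | cons x t =>
                exfalso
                simp only [List.length_cons] at c1 c2 c3 c5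
                omega
            subst h0
            simp only [List.length_nil, if_neg c1, if_neg c2, if_neg c3, if_neg c5,
              if_pos (by omega : (0:Nat) ≤ 4), List.append_nil]
            exact ih _ _ _ _ _ _ _ _ h1 h2 h3 h4 h5 h6 h7 h8

-- ===== VERDICT (by name: the statement is the Claim_ definition above) =====
theorem get_family_age_ranges_spec : Claim_equal_get_family_age_ranges := by
  intro l _
  unfold Spec_get_family_age_ranges get_family_age_ranges get_family_age_ranges_alt
  rw [fa_eq]
  have h := phase2 (pvFamilyAgesB l).values [] [] [] [] [] [] [] []
    rfl rfl rfl rfl rfl rfl rfl rfl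
  simp only at h ⊢
  obtain ⟨e1, e2, e3, e4⟩ := h
  rw [e1, e2, e3, e4]
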